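-- pv_equiv track=rewrite | github.com/inucreativehrd21/TextMining | edu-ai-mvp/backend/curriculum_generator.py | _map_job_role_category
-- ===== SOURCE A (Python) =====
-- def _map_job_role_category(job_role: str) -> str:
--     """직무를 표준 카테고리로 매핑"""
--     role_lower = job_role.lower()
--
--     if any(term in role_lower for term in ['develop', 'engineer', 'programmer', 'dev']):
--         return 'engineering'
--     elif any(term in role_lower for term in ['sales', 'account', 'business']):
--         return 'sales'
--     elif any(term in role_lower for term in ['marketing', 'promotion', 'brand']):
--         return 'marketing'
--     elif any(term in role_lower for term in ['hr', 'human', 'recruit', 'talent']):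
--         return 'hr'
--     else:
--         return 'all_roles'
-- ===== SOURCE B (Python) =====
-- # B: instead of per-keyword substring searches in an if/elif chain, scan the
-- # lowered text once position by position (brute-force multi-pattern matching),
-- # collecting into a set every category whose keyword starts at that position,
-- # then resolve the collected set by a fixed priority order.
-- _KEYWORD_CATEGORIES = [
--     ('develop', 'engineering'), ('engineer', 'engineering'),
--     ('programmer', 'engineering'), ('dev', 'engineering'),
--     ('sales', 'sales'), ('account', 'sales'), ('business', 'sales'),
--     ('marketing', 'marketing'), ('promotion', 'marketing'), ('brand', 'marketing'),
--     ('hr', 'hr'), ('human', 'hr'), ('recruit', 'hr'), ('talent', 'hr'),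
-- ]
-- _PRIORITY = ['engineering', 'sales', 'marketing', 'hr']
--
-- def _map_job_role_category(job_role: str) -> str:
--     role_lower = job_role.lower()
--     matched = set()
--     for i in range(len(role_lower)):
--         for kw, cat in _KEYWORD_CATEGORIES:
--             if role_lower.startswith(kw, i):
--                 matched.add(cat)
--     for cat in _PRIORITY:
--         if cat in matched:
--             return cat
--     return 'all_roles'
-- ===== Notes on version B (the rewrite author's own statement) =====
-- stated objective: alternative
-- what changed: Replaces per-keyword substring tests in an if/elif chain by a single position-by-position scan of the text that collects all matched categories into a set (brute-force multi-pattern matching), followed by a priority-order resolution pass.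
import Mathlib
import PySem

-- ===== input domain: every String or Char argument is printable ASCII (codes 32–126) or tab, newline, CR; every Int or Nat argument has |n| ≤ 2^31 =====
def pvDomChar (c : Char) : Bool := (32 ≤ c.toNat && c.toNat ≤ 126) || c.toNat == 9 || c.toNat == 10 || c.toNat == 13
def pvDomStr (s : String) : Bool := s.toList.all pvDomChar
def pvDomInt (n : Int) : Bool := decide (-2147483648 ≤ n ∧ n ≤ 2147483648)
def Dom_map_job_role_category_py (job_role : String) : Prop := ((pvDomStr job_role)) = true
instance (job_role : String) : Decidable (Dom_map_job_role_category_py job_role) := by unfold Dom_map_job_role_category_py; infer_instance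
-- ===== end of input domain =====

-- B replaces the per-keyword if/elif substring chain by one position-by-position scan of the text collecting matched categories into a set, then a priority-resolution pass (alternative algorithm; same behaviour).


-- ===== PORT A =====
-- Port of A: if/elif chain over any(term in role_lower for term in [...]).
def map_job_role_category_py (job_role : String) : String :=
  let role_lower := PySem.Str.lower job_role
  if ["develop", "engineer", "programmer", "dev"].any (fun term => PySem.Str.isIn term role_lower) then
    "engineering"
  else if ["sales", "account", "business"].any (fun term => PySem.Str.isIn term role_lower) then
    "sales"
  else if ["marketing", "promotion", "brand"].any (fun term => PySem.Str.isIn term role_lower) then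
    "marketing"
  else if ["hr", "human", "recruit", "talent"].any (fun term => PySem.Str.isIn term role_lower) then
    "hr"
  else
    "all_roles"

-- ===== PORT B =====
-- B: scan positions 0..len-1 once; at each position add to a set every category
-- whose keyword starts there; then return the first priority category in the set.
def pvKeywordCategories : List (String × String) :=
  [("develop", "engineering"), ("engineer", "engineering"),
   ("programmer", "engineering"), ("dev", "engineering"),
   ("sales", "sales"), ("account", "sales"), ("business", "sales"),
   ("marketing", "marketing"), ("promotion", "marketing"), ("brand", "marketing"),
   ("hr", "hr"), ("human", "hr"), ("recruit", "hr"), ("talent", "hr")]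

def pvPriority : List String := ["engineering", "sales", "marketing", "hr"]

-- the scan loop of Source B: for i in range(len): for kw,cat in table: if startswith(kw,i): matched.add(cat)
-- (role_lower.startswith(kw, i) for 0 ≤ i < len is exactly: kw is a prefix of the drop-i suffix)
def pvScan (cs : List Char) : PySem.Set String :=
  (List.range cs.length).foldl (fun acc i =>
    pvKeywordCategories.foldl (fun acc p =>
      if PySem.Chars.startswith (cs.drop i) p.1.toList then PySem.Set.add acc p.2 else acc) acc)
    PySem.Set.empty

def map_job_role_category_py_alt (job_role : String) : String :=
  let cs := (PySem.Str.lower job_role).toList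
  let matched := pvScan cs
  match pvPriority.find? (fun cat => PySem.Set.contains matched cat) with
  | some cat => cat
  | none => "all_roles"

-- ===== PRECONDITION & SPEC =====
def Spec_map_job_role_category_py (job_role : String) (out : String) : Prop := out = map_job_role_category_py_alt job_role
instance (job_role : String) (out : String) : Decidable (Spec_map_job_role_category_py job_role out) := by unfold Spec_map_job_role_category_py; infer_instance

-- ===== CLAIM (what is proved, stated in full; the proofs are below) =====
def Claim_equal_map_job_role_category_py : Prop := ∀ (job_role : String), Dom_map_job_role_category_py job_role → Spec_map_job_role_category_py job_role (map_job_role_category_py job_role)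

-- ===== LEMMAS AND PROOFS =====

-- membership through the inner table fold
theorem pv_mem_inner (cs : List Char) (i : Nat) (table : List (String × String))
    (acc : PySem.Set String) (c : String) :
    c ∈ table.foldl (fun acc p =>
        if PySem.Chars.startswith (cs.drop i) p.1.toList then PySem.Set.add acc p.2 else acc) acc ↔
      c ∈ acc ∨ ∃ p ∈ table, PySem.Chars.startswith (cs.drop i) p.1.toList = true ∧ p.2 = c := by
  induction table generalizing acc with
  | nil => simp
  | cons p t ih =>
      simp only [List.foldl_cons, ih, List.mem_cons]
      by_cases h : PySem.Chars.startswith (cs.drop i) p.1.toList = true <;>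
        simp [h, PySem.Set.mem_add] <;> tauto

-- membership through the outer position fold
theorem pv_mem_outer (cs : List Char) (n : Nat) (acc : PySem.Set String) (c : String) :
    c ∈ (List.range n).foldl (fun acc i =>
        pvKeywordCategories.foldl (fun acc p =>
          if PySem.Chars.startswith (cs.drop i) p.1.toList then PySem.Set.add acc p.2 else acc) acc) acc ↔
      c ∈ acc ∨ ∃ i < n, ∃ p ∈ pvKeywordCategories,
        PySem.Chars.startswith (cs.drop i) p.1.toList = true ∧ p.2 = c := by
  induction n generalizing acc with
  | zero => simp
  | succ n ih =>
      rw [List.range_succ, List.foldl_append]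
      simp only [List.foldl_cons, List.foldl_nil, ih, pv_mem_inner]
      constructor
      · rintro ((h | ⟨i, hi, h⟩) | hp)
        · exact Or.inl h
        · exact Or.inr ⟨i, Nat.lt_succ_of_lt hi, h⟩
        · exact Or.inr ⟨n, Nat.lt_succ_self n, hp⟩
      · rintro (h | ⟨i, hi, h⟩)
        · exact Or.inl (Or.inl h)
        · rcases Nat.lt_succ_iff_lt_or_eq.mp hi with hi' | rfl
          · exact Or.inl (Or.inr ⟨i, hi', h⟩)
          · exact Or.inr h

-- a nonempty keyword starts at some position < length iff it is a substring
theorem pv_exists_pos_iff_isIn (cs : List Char) (kw : List Char) (hkw : kw ≠ []) :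
    (∃ i < cs.length, PySem.Chars.startswith (cs.drop i) kw = true) ↔
      PySem.Chars.isIn kw cs = true := by
  rw [← PySem.Chars.exists_prefix_drop_iff_isIn]
  constructor
  · rintro ⟨i, _, h⟩
    exact ⟨i, (PySem.Chars.startswith_iff _ _).mp h⟩
  · rintro ⟨j, h⟩
    refine ⟨j, ?_, (PySem.Chars.startswith_iff _ _).mpr h⟩
    have hl := h.length_le
    have hk : 0 < kw.length := List.length_pos_of_ne_nil hkw
    simp only [List.length_drop] at hl
    omega

theorem pvScan_contains (cs : List Char) (c : String) :
    PySem.Set.contains (pvScan cs) c = true ↔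
      ∃ p ∈ pvKeywordCategories, PySem.Chars.isIn p.1.toList cs = true ∧ p.2 = c := by
  unfold pvScan
  rw [PySem.Set.contains_iff, pv_mem_outer]
  have hne : ∀ p ∈ pvKeywordCategories, p.1.toList ≠ [] := by decide
  constructor
  · rintro (h | ⟨i, hi, p, hp, h, rfl⟩)
    · simp [PySem.Set.empty] at h
    · exact ⟨p, hp, (pv_exists_pos_iff_isIn cs p.1.toList (hne p hp)).mp ⟨i, hi, h⟩, rfl⟩
  · rintro ⟨p, hp, h, rfl⟩
    obtain ⟨i, hi, h'⟩ := (pv_exists_pos_iff_isIn cs p.1.toList (hne p hp)).mpr h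
    exact Or.inr ⟨i, hi, p, hp, h', rfl⟩

-- ===== VERDICT (by name: the statement is the Claim_ definition above) =====
theorem map_job_role_category_py_spec : Claim_equal_map_job_role_category_py := by
  intro job_role _
  unfold Spec_map_job_role_category_py map_job_role_category_py map_job_role_category_py_alt
  set cs := (PySem.Str.lower job_role).toList with hcs
  have hStr : ∀ t : String, PySem.Str.isIn t (PySem.Str.lower job_role) =
      PySem.Chars.isIn t.toList cs := by
    intro t; rw [hcs, PySem.Str.isIn_eq]
  have heng : PySem.Set.contains (pvScan cs) "engineering" =
      (PySem.Chars.isIn "develop".toList cs || (PySem.Chars.isIn "engineer".toList cs ||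
        (PySem.Chars.isIn "programmer".toList cs || PySem.Chars.isIn "dev".toList cs))) := by
    rw [Bool.eq_iff_iff, pvScan_contains]
    simp [pvKeywordCategories]
  have hsal : PySem.Set.contains (pvScan cs) "sales" =
      (PySem.Chars.isIn "sales".toList cs || (PySem.Chars.isIn "account".toList cs ||
        PySem.Chars.isIn "business".toList cs)) := by
    rw [Bool.eq_iff_iff, pvScan_contains]
    simp [pvKeywordCategories]
  have hmar : PySem.Set.contains (pvScan cs) "marketing" =
      (PySem.Chars.isIn "marketing".toList cs || (PySem.Chars.isIn "promotion".toList cs ||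
        PySem.Chars.isIn "brand".toList cs)) := by
    rw [Bool.eq_iff_iff, pvScan_contains]
    simp [pvKeywordCategories]
  have hhr : PySem.Set.contains (pvScan cs) "hr" =
      (PySem.Chars.isIn "hr".toList cs || (PySem.Chars.isIn "human".toList cs ||
        (PySem.Chars.isIn "recruit".toList cs || PySem.Chars.isIn "talent".toList cs))) := by
    rw [Bool.eq_iff_iff, pvScan_contains]
    simp [pvKeywordCategories]
  simp only [hStr, pvPriority, List.find?, heng, hsal, hmar, hhr,
    List.any_cons, List.any_nil, Bool.or_false]
  set beng := (PySem.Chars.isIn "develop".toList cs || (PySem.Chars.isIn "engineer".toList cs ||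
    (PySem.Chars.isIn "programmer".toList cs || PySem.Chars.isIn "dev".toList cs))) with hb1
  set bsal := (PySem.Chars.isIn "sales".toList cs || (PySem.Chars.isIn "account".toList cs ||
    PySem.Chars.isIn "business".toList cs)) with hb2
  set bmar := (PySem.Chars.isIn "marketing".toList cs || (PySem.Chars.isIn "promotion".toList cs ||
    PySem.Chars.isIn "brand".toList cs)) with hb3
  set bhr := (PySem.Chars.isIn "hr".toList cs || (PySem.Chars.isIn "human".toList cs ||
    (PySem.Chars.isIn "recruit".toList cs || PySem.Chars.isIn "talent".toList cs))) with hb4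
  cases beng <;> cases bsal <;> cases bmar <;> cases bhr <;> simp
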